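-- pv_equiv track=rewrite | github.com/mikeramage/aoc2020 | python/day24/day24.py | do_initial_flips
-- ===== SOURCE A (Python) =====
-- SE = "se"
--
-- SW = "sw"
--
-- NE = "ne"
--
-- NW = "nw"
--
-- E = "e"
--
-- W = "w"
--
-- BLACK = "Black"
--
-- WHITE = "White"
--
-- def get_coords(instructions):
--     row = 0
--     col = 0
--     for instruction in instructions:
--         if instruction == E:
--             col += 1
--         elif instruction == W:
--             col -= 1
--         elif instruction == NW:
--             row += 1
--         elif instruction == SW:
--             row -= 1
--             col -= 1
--         elif instruction == SE:
--             row -= 1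
--         elif instruction == NE:
--             row += 1
--             col += 1
--         else:
--             raise Exception(f"Unrecognized instruction: {instruction}")
--     return (row, col)
--
-- def flip_colour(colour):
--     if colour == WHITE:
--         return BLACK
--     elif colour == BLACK:
--         return WHITE
--     raise Exception(f"Unrecognized colour: {colour}")
--
-- def do_initial_flips(instruction_set):
--     flipped_tiles = dict()
--     for instructions in instruction_set:
--         tile = get_coords(instructions)
--         if tile in flipped_tiles.keys():
--             flipped_tiles[tile] = flip_colour(flipped_tiles[tile])
--         else:
--             flipped_tiles[tile] = BLACK
--     return flipped_tiles
-- ===== SOURCE B (Python) =====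
-- SE = "se"
-- SW = "sw"
-- NE = "ne"
-- NW = "nw"
-- E = "e"
-- W = "w"
-- BLACK = "Black"
-- WHITE = "White"
--
-- _DELTAS = {E: (0, 1), W: (0, -1), NW: (1, 0), SW: (-1, -1), SE: (-1, 0), NE: (1, 1)}
--
-- def _tile(instructions):
--     row = 0
--     col = 0
--     for instruction in instructions:
--         dr, dc = _DELTAS[instruction]
--         row += dr
--         col += dc
--     return (row, col)
--
-- def do_initial_flips(instruction_set):
--     counts = {}
--     for instructions in instruction_set:
--         tile = _tile(instructions)
--         counts[tile] = counts.get(tile, 0) + 1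
--     return {tile: (BLACK if n % 2 == 1 else WHITE) for tile, n in counts.items()}
-- ===== Notes on version B (the rewrite author's own statement) =====
-- stated objective: alternative
-- what changed: B replaces A's in-place colour-toggling dict (lookup, flip_colour, reinsert per line) by a two-pass count-then-parity algorithm: it tallies each tile's occurrences into a counts dict (coordinates computed via a direction->delta table instead of an if/elif chain) and then maps each tile to Black iff its count is odd.
import Mathlib
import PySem

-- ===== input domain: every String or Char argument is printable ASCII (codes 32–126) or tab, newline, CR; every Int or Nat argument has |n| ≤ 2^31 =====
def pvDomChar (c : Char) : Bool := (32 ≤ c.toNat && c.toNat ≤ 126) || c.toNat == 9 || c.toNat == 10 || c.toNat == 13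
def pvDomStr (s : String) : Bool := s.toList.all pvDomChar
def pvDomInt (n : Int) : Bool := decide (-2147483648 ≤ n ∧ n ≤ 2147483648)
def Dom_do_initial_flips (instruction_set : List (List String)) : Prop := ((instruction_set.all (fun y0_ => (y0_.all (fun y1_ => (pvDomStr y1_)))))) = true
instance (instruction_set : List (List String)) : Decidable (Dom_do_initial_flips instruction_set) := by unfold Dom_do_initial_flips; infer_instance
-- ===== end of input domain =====

-- B replaces A's per-line toggle (flip_colour + reinsert) by counting each tile once and
-- assigning Black iff its count is odd; tile coordinates come from a delta table, not an if/elif chain.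

-- ===== PORT A =====
def getCoords (instructions : List String) : Option (Int × Int) :=
  instructions.foldl (fun acc instruction =>
    match acc with
    | none => none
    | some (row, col) =>
      if instruction == "e" then some (row, col + 1)
      else if instruction == "w" then some (row, col - 1)
      else if instruction == "nw" then some (row + 1, col)
      else if instruction == "sw" then some (row - 1, col - 1)
      else if instruction == "se" then some (row - 1, col)
      else if instruction == "ne" then some (row + 1, col + 1)
      else none)  -- Python raises Exception here; excluded by Pre_
    (some (0, 0))

def flipColour (colour : String) : String :=
  if colour == "White" then "Black"
  else if colour == "Black" then "White"
  else colour  -- Python raises here; unreachable, the dict only holds "Black"/"White"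

def do_initial_flips (instruction_set : List (List String)) : List (Int × Int × String) :=
  (instruction_set.foldl (fun flipped instructions =>
      match getCoords instructions with
      | none => flipped  -- Python raises here; excluded by Pre_
      | some tile =>
        if flipped.contains tile then flipped.insert tile (flipColour (flipped.getD tile ""))
        else flipped.insert tile "Black")
    (PySem.Dict.empty)).items.map (fun p => (p.1.1, p.1.2, p.2))

-- ===== PORT B =====
def pvDeltas : PySem.Dict String (Int × Int) :=
  PySem.Dict.ofList [("e", (0, 1)), ("w", (0, -1)), ("nw", (1, 0)),
                     ("sw", (-1, -1)), ("se", (-1, 0)), ("ne", (1, 1))]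

def pvTile (instructions : List String) : Option (Int × Int) :=
  instructions.foldl (fun acc instruction =>
    match acc with
    | none => none
    | some (row, col) =>
      match pvDeltas.get? instruction with
      | none => none  -- Python raises KeyError here; excluded by Pre_
      | some (dr, dc) => some (row + dr, col + dc))
    (some (0, 0))

def pvColour (n : Int) : String := if n % 2 == 1 then "Black" else "White"

def do_initial_flips_alt (instruction_set : List (List String)) : List (Int × Int × String) :=
  (instruction_set.foldl (fun counts instructions =>
      match pvTile instructions with
      | none => counts  -- Python raises here; excluded by Pre_
      | some tile => counts.insert tile (counts.getD tile 0 + 1))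
    (PySem.Dict.empty : PySem.Dict (Int × Int) Int)).items.map (fun p => (p.1.1, p.1.2, pvColour p.2))

-- ===== PRECONDITION & SPEC =====
-- Pre_ excludes exactly the inputs containing an unrecognized direction string, on which the
-- Python A raises Exception (and B raises KeyError).
def Pre_do_initial_flips (instruction_set : List (List String)) : Prop :=
  ∀ instructions ∈ instruction_set, ∀ s ∈ instructions,
    s ∈ (["e", "w", "nw", "sw", "se", "ne"] : List String)
instance (instruction_set : List (List String)) : Decidable (Pre_do_initial_flips instruction_set) := by
  unfold Pre_do_initial_flips; infer_instance

def pvWitness_do_initial_flips : List (List String) :=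
  [["e", "ne"], ["e", "ne"], ["w"], []]

def Spec_do_initial_flips (instruction_set : List (List String)) (out : List (Int × Int × String)) : Prop := out = do_initial_flips_alt instruction_set
instance (instruction_set : List (List String)) (out : List (Int × Int × String)) : Decidable (Spec_do_initial_flips instruction_set out) := by unfold Spec_do_initial_flips; infer_instance

-- ===== CLAIM (what is proved, stated in full; the proofs are below) =====
def Claim_equal_do_initial_flips : Prop := ∀ (instruction_set : List (List String)), Dom_do_initial_flips instruction_set → Pre_do_initial_flips instruction_set → Spec_do_initial_flips instruction_set (do_initial_flips instruction_set)

-- ===== LEMMAS AND PROOFS =====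

-- helper used only by the proofs
def pvTval (instructions : List String) : Int × Int := (pvTile instructions).getD (0, 0)

lemma coords_aux (instructions : List String)
    (h : ∀ s ∈ instructions, s ∈ (["e", "w", "nw", "sw", "se", "ne"] : List String)) :
    ∀ a : Int × Int,
      instructions.foldl (fun acc instruction =>
        match acc with
        | none => none
        | some (row, col) =>
          if instruction == "e" then some (row, col + 1)
          else if instruction == "w" then some (row, col - 1)
          else if instruction == "nw" then some (row + 1, col)
          else if instruction == "sw" then some (row - 1, col - 1)
          else if instruction == "se" then some (row - 1, col)
          else if instruction == "ne" then some (row + 1, col + 1)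
          else none) (some a)
      = instructions.foldl (fun acc instruction =>
        match acc with
        | none => none
        | some (row, col) =>
          match pvDeltas.get? instruction with
          | none => none
          | some (dr, dc) => some (row + dr, col + dc)) (some a)
      ∧ ∃ t, instructions.foldl (fun acc instruction =>
        match acc with
        | none => none
        | some (row, col) =>
          match pvDeltas.get? instruction with
          | none => none
          | some (dr, dc) => some (row + dr, col + dc)) (some a) = some t := by
  induction instructions with
  | nil => intro a; exact ⟨rfl, a, rfl⟩
  | cons s rest ih =>
    intro ⟨r, c⟩
    have hs := h s (List.mem_cons_self ..)
    have hrest : ∀ x ∈ rest, x ∈ (["e", "w", "nw", "sw", "se", "ne"] : List String) :=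
      fun x hx => h x (List.mem_cons_of_mem _ hx)
    simp only [List.mem_cons, List.not_mem_nil, or_false] at hs
    simp only [List.foldl_cons]
    rcases hs with rfl | rfl | rfl | rfl | rfl | rfl
    · rw [show pvDeltas.get? "e" = some ((0 : Int), (1 : Int)) from rfl]
      simp only [add_zero]
      exact ih hrest (r, c + 1)
    · rw [show pvDeltas.get? "w" = some ((0 : Int), (-1 : Int)) from rfl]
      simp only [add_zero]
      exact ih hrest (r, c - 1)
    · rw [show pvDeltas.get? "nw" = some ((1 : Int), (0 : Int)) from rfl]
      simp only [add_zero]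
      exact ih hrest (r + 1, c)
    · rw [show pvDeltas.get? "sw" = some ((-1 : Int), (-1 : Int)) from rfl]
      exact ih hrest (r - 1, c - 1)
    · rw [show pvDeltas.get? "se" = some ((-1 : Int), (0 : Int)) from rfl]
      simp only [add_zero]
      exact ih hrest (r - 1, c)
    · rw [show pvDeltas.get? "ne" = some ((1 : Int), (1 : Int)) from rfl]
      exact ih hrest (r + 1, c + 1)

lemma pvTile_some (instructions : List String)
    (h : ∀ s ∈ instructions, s ∈ (["e", "w", "nw", "sw", "se", "ne"] : List String)) :
    pvTile instructions = some (pvTval instructions) := by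
  obtain ⟨-, t, ht⟩ := coords_aux instructions h (0, 0)
  unfold pvTval pvTile
  rw [ht]; rfl

lemma getCoords_some (instructions : List String)
    (h : ∀ s ∈ instructions, s ∈ (["e", "w", "nw", "sw", "se", "ne"] : List String)) :
    getCoords instructions = some (pvTval instructions) := by
  obtain ⟨heq, -⟩ := coords_aux instructions h (0, 0)
  unfold getCoords
  rw [heq, ← pvTile]
  exact pvTile_some instructions h

lemma colour_flip (n : Int) : flipColour (pvColour n) = pvColour (n + 1) := by
  unfold flipColour pvColour
  by_cases h : n % 2 = 1
  · have h2 : (n + 1) % 2 = 0 := by omega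
    simp [h, h2]
  · have h0 : n % 2 = 0 := by omega
    have h2 : (n + 1) % 2 = 1 := by omega
    simp [h0, h2]

lemma ofList_append_mem (ts : List (Int × Int)) (u : Int × Int) (h : u ∈ ts) :
    PySem.Set.ofList (ts ++ [u]) = PySem.Set.ofList ts := by
  rw [PySem.Set.ofList_eq_foldl, List.foldl_append, ← PySem.Set.ofList_eq_foldl,
    List.foldl_cons, List.foldl_nil]
  simp [PySem.Set.add, (PySem.Set.mem_ofList ts u).2 h]

lemma ofList_append_not_mem (ts : List (Int × Int)) (u : Int × Int) (h : u ∉ ts) :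
    PySem.Set.ofList (ts ++ [u]) = PySem.Set.ofList ts ++ [u] := by
  rw [PySem.Set.ofList_eq_foldl, List.foldl_append, ← PySem.Set.ofList_eq_foldl,
    List.foldl_cons, List.foldl_nil]
  simp [PySem.Set.add, PySem.Set.contains, (PySem.Set.mem_ofList ts u).not.2 h]

lemma B_fold_eq (instruction_set : List (List String))
    (h : Pre_do_initial_flips instruction_set) :
    ∀ d : PySem.Dict (Int × Int) Int,
      instruction_set.foldl (fun counts instructions =>
        match pvTile instructions with
        | none => counts
        | some tile => counts.insert tile (counts.getD tile 0 + 1)) d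
      = (instruction_set.map pvTval).foldl (fun d t => d.insert t (d.getD t 0 + 1)) d := by
  induction instruction_set with
  | nil => intro d; rfl
  | cons instrs rest ih =>
    intro d
    have h1 := pvTile_some instrs (fun s hs => h instrs (List.mem_cons_self ..) s hs)
    have hrest : Pre_do_initial_flips rest := fun l hl => h l (List.mem_cons_of_mem _ hl)
    simp only [List.map_cons, List.foldl_cons, h1]
    exact ih hrest _

lemma A_fold_items (instruction_set : List (List String))
    (h : Pre_do_initial_flips instruction_set) :
    (instruction_set.foldl (fun flipped instructions =>
      match getCoords instructions with
      | none => flipped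
      | some tile =>
        if flipped.contains tile then flipped.insert tile (flipColour (flipped.getD tile ""))
        else flipped.insert tile "Black") PySem.Dict.empty).items
    = (PySem.Set.ofList (instruction_set.map pvTval)).map
        (fun k => (k, pvColour (((instruction_set.map pvTval).count k : Int)))) := by
  induction instruction_set using List.reverseRecOn with
  | nil => rfl
  | append_singleton rest instrs ih =>
    have hrest : Pre_do_initial_flips rest := fun l hl => h l (List.mem_append_left _ hl)
    have hvalid : ∀ s ∈ instrs, s ∈ (["e", "w", "nw", "sw", "se", "ne"] : List String) :=
      fun s hs => h instrs (List.mem_append_right _ (List.mem_cons_self ..)) s hs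
    have hu : getCoords instrs = some (pvTval instrs) := getCoords_some instrs hvalid
    set ts := rest.map pvTval with hts
    set u := pvTval instrs with hudef
    set D := rest.foldl (fun flipped instructions =>
      match getCoords instructions with
      | none => flipped
      | some tile =>
        if flipped.contains tile then flipped.insert tile (flipColour (flipped.getD tile ""))
        else flipped.insert tile "Black") PySem.Dict.empty with hD
    have hitems : D.items = (PySem.Set.ofList ts).map
        (fun k => (k, pvColour ((ts.count k : Int)))) := ih hrest
    have hkeys : D.keys = PySem.Set.ofList ts := by
      show D.items.map Prod.fst = _
      rw [hitems, List.map_map]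
      have hcomp : (Prod.fst ∘ fun k : Int × Int => (k, pvColour ((ts.count k : Int)))) = id := rfl
      rw [hcomp, List.map_id]
    have hnd : D.keys.Nodup := by rw [hkeys]; exact PySem.Set.nodup_ofList ts
    rw [List.foldl_append, List.foldl_cons, List.foldl_nil, ← hD, hu]
    rw [List.map_append, List.map_cons, List.map_nil, ← hts, ← hudef]
    show (if D.contains u = true then D.insert u (flipColour (D.getD u ""))
      else D.insert u "Black").items = _
    by_cases hmem : u ∈ ts
    · have hC : D.contains u = true := by
        rw [PySem.Dict.contains_eq_decide_mem_keys, hkeys]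
        simpa using (PySem.Set.mem_ofList ts u).2 hmem
      have hgetD : D.getD u "" = pvColour ((ts.count u : Int)) := by
        refine PySem.Dict.getD_of_mem_items D ?_ hnd ""
        rw [hitems]
        exact List.mem_map_of_mem ((PySem.Set.mem_ofList ts u).2 hmem)
      rw [if_pos hC, PySem.Dict.items_insert_of_contains D _ hC, hitems, List.map_map,
        ofList_append_mem ts u hmem]
      refine List.map_congr_left (fun k hk => ?_)
      by_cases hku : k = u
      · subst hku
        simp only [Function.comp_apply, beq_self_eq_true]
        rw [hgetD, colour_flip]
        have hcnt : ((ts ++ [u]).count u : Int) = (ts.count u : Int) + 1 := by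
          simp [List.count_append]
        rw [hcnt]
        exact if_pos trivial
      · have hbeq : (k == u) = false := beq_eq_false_iff_ne.2 hku
        simp only [Function.comp_apply, hbeq, if_neg Bool.false_ne_true]
        have : (ts ++ [u]).count k = ts.count k := by
          simp [List.count_append, Ne.symm hku]
        rw [this]
    · have hC : D.contains u = false := by
        rw [PySem.Dict.contains_eq_decide_mem_keys, hkeys]
        simpa using (PySem.Set.mem_ofList ts u).not.2 hmem
      have hC' : ¬ (D.contains u = true) := by simp [hC]
      rw [if_neg hC', PySem.Dict.items_insert_of_not_contains D _ hC, hitems,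
        ofList_append_not_mem ts u hmem, List.map_append]
      congr 1
      · refine List.map_congr_left (fun k hk => ?_)
        have hku : k ≠ u := fun he => hmem (he ▸ (PySem.Set.mem_ofList ts k).1 hk)
        have : (ts ++ [u]).count k = ts.count k := by
          simp [List.count_append, Ne.symm hku]
        rw [this]
      · have h1 : (ts ++ [u]).count u = ts.count u + 1 := by simp [List.count_append]
        have h0 : ts.count u = 0 := List.count_eq_zero.2 hmem
        simp [h0, pvColour]

lemma main_items (instruction_set : List (List String))
    (h : Pre_do_initial_flips instruction_set) :
    (instruction_set.foldl (fun flipped instructions =>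
      match getCoords instructions with
      | none => flipped
      | some tile =>
        if flipped.contains tile then flipped.insert tile (flipColour (flipped.getD tile ""))
        else flipped.insert tile "Black")
      (PySem.Dict.empty)).items =
    ((instruction_set.foldl (fun counts instructions =>
      match pvTile instructions with
      | none => counts
      | some tile => counts.insert tile (counts.getD tile 0 + 1))
      (PySem.Dict.empty : PySem.Dict (Int × Int) Int)).items).map (fun p => (p.1, pvColour p.2)) := by
  rw [B_fold_eq instruction_set h, PySem.Dict.foldl_insert_getD_add_one_eq_counter,
    PySem.Dict.items_counter, List.map_map, A_fold_items instruction_set h]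
  rfl

-- ===== VERDICT (by name: the statement is the Claim_ definition above) =====
theorem do_initial_flips_spec : Claim_equal_do_initial_flips := by
  intro iset _ hpre
  unfold Spec_do_initial_flips do_initial_flips do_initial_flips_alt
  rw [main_items iset hpre, List.map_map]
  rfl
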